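-- pv_equiv track=rewrite | github.com/miagarner/Python_course | breakwithwhile.py | name_adder
-- ===== SOURCE A (Python) =====
-- def name_adder(lst):
--     i=0
--     new_list=[]
--     while i<len(lst):
--         if lst[i]!="":
--             new_list.append(lst[i])
--         else:
--             break
--         i=i+1
--     return new_list
-- ===== SOURCE B (Python) =====
-- def name_adder(lst):
--     try:
--         idx = lst.index("")
--     except ValueError:
--         idx = len(lst)
--     return list(lst[:idx])
-- ===== Notes on version B (the rewrite author's own statement) =====
-- stated objective: idiomatic
-- what changed: Replaces the index-counter/append/break while loop by locating the first empty string with list.index and returning a single prefix slice.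
import Mathlib
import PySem

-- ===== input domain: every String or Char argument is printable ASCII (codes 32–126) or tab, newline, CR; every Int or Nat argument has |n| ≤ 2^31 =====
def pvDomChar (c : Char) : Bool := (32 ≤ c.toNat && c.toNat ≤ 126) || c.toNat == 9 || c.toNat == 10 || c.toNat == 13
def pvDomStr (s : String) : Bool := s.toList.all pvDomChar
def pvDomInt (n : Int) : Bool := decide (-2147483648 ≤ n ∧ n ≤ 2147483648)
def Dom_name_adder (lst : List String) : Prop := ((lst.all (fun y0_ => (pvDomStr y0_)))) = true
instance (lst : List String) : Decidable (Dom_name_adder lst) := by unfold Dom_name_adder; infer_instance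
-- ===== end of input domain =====

-- B replaces A's counter/append/break while loop by finding the first empty string's index and taking that prefix (idiomatic decomposition).


-- ===== PORT A =====
-- A's while loop: i counts up, appends lst[i] until an empty string breaks.
def nameAdderGo (lst : List String) (i : Nat) (acc : List String) : List String :=
  if h : i < lst.length then
    if lst[i] ≠ "" then nameAdderGo lst (i + 1) (acc ++ [lst[i]])
    else acc
  else acc
termination_by lst.length - i

def name_adder (lst : List String) : List String :=
  nameAdderGo lst 0 []

-- ===== PORT B =====
def name_adder_alt (lst : List String) : List String :=
  let idx : Nat :=
    match PySem.List.index? lst "" with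
    | some k => k
    | none => lst.length
  lst.take idx

-- ===== PRECONDITION & SPEC =====
def Spec_name_adder (lst : List String) (out : List String) : Prop := out = name_adder_alt lst
instance (lst : List String) (out : List String) : Decidable (Spec_name_adder lst out) := by unfold Spec_name_adder; infer_instance

-- ===== CLAIM (what is proved, stated in full; the proofs are below) =====
def Claim_equal_name_adder : Prop := ∀ (lst : List String), Dom_name_adder lst → Spec_name_adder lst (name_adder lst)

-- ===== LEMMAS AND PROOFS =====

theorem nameAdderGo_eq (lst : List String) (i : Nat) (acc : List String) :
    nameAdderGo lst i acc = acc ++ (lst.drop i).takeWhile (fun s => s ≠ "") := by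
  induction i, acc using nameAdderGo.induct lst with
  | case1 i acc h hne ih =>
      rw [nameAdderGo]
      simp only [h, dif_pos, if_pos hne, ih]
      rw [List.drop_eq_getElem_cons h, List.takeWhile_cons]
      simp [hne]
  | case2 i acc h hne =>
      rw [nameAdderGo]
      simp only [h, dif_pos]
      rw [List.drop_eq_getElem_cons h, List.takeWhile_cons]
      simp at hne
      simp [hne]
  | case3 i acc h =>
      rw [nameAdderGo]
      have hd : lst.drop i = [] := List.drop_eq_nil_of_le (by omega)
      rw [dif_neg h, hd]
      simp

theorem alt_eq (lst : List String) :
    name_adder_alt lst = lst.takeWhile (fun s => s ≠ "") := by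
  induction lst with
  | nil => simp [name_adder_alt]
  | cons x xs ih =>
      simp only [name_adder_alt] at ih ⊢
      by_cases hx : x = ""
      · subst hx
        rw [PySem.List.index?_cons_self]
        simp
      · rw [PySem.List.index?_cons_of_ne xs hx, List.takeWhile_cons]
        cases h : PySem.List.index? xs "" with
        | some k =>
            rw [h] at ih
            simp only [Option.map_some]
            simp [hx]
            simpa using ih
        | none =>
            rw [h] at ih
            simp only [Option.map_none]
            simp [hx]
            simpa using ih

-- ===== VERDICT (by name: the statement is the Claim_ definition above) =====
theorem name_adder_spec : Claim_equal_name_adder := by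
  intro lst _
  unfold Spec_name_adder name_adder
  rw [nameAdderGo_eq, alt_eq]
  simp
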